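-- pv_equiv track=rewrite | github.com/gatocor/pinn_models | pinns/problem_weak.py | _ref_nodes_pqr
-- ===== SOURCE A (Python) =====
-- def _ref_nodes_pqr(N: int):
--     """
--     Return the local DOF multi-indices as a list of (p, q, r) with p+q+r=N.
--
--     Ordering:
--       - Corners:      (N,0,0), (0,N,0), (0,0,N)
--       - Edge 0→1:     (N-s, s, 0) for s=1..N-1
--       - Edge 1→2:     (0, N-s, s) for s=1..N-1
--       - Edge 2→0:     (s, 0, N-s) for s=1..N-1
--       - Interior:     remaining (p,q,r) with p,q,r≥1
--
--     The reference position of node (p,q,r) is (xi,eta) = (q/N, r/N).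
--     """
--     nodes = []
--     # corners
--     nodes += [(N, 0, 0), (0, N, 0), (0, 0, N)]
--     # edge 0→1 (r=0, away from corner 0 toward corner 1)
--     for s in range(1, N):
--         nodes.append((N - s, s, 0))
--     # edge 1→2 (p=0)
--     for s in range(1, N):
--         nodes.append((0, N - s, s))
--     # edge 2→0 (q=0)
--     for s in range(1, N):
--         nodes.append((s, 0, N - s))
--     # interior
--     for r in range(1, N):
--         for q in range(1, N - r):
--             p = N - q - r
--             if p >= 1:
--                 nodes.append((p, q, r))
--     return nodes
-- ===== SOURCE B (Python) =====
-- def _ref_nodes_pqr(N: int):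
--     """Single scan of the full barycentric grid p+q+r=N, classifying each
--     node into interior/corner/edge buckets (interior = no zero coordinate,
--     tested first as the common case; corners = at least two zeros, already
--     listed explicitly; else exactly one zero picks the edge), then
--     concatenating the buckets in the reference ordering.  The third (q-vanishing) edge
--     bucket comes out in reversed s-order under this scan, so it is
--     reversed once before concatenating."""
--     corners = [(N, 0, 0), (0, N, 0), (0, 0, N)]
--     e01, e12, e20, interior = [], [], [], []
--     for r in range(0, N + 1):
--         for q in range(0, N - r + 1):
--             p = N - q - r
--             if p and q and r:
--                 interior.append((p, q, r))
--             elif (p == 0) + (q == 0) + (r == 0) >= 2: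
--                 continue  # a corner: already listed explicitly
--             elif r == 0:
--                 e01.append((p, q, r))
--             elif p == 0:
--                 e12.append((p, q, r))
--             else:
--                 e20.append((p, q, r))
--     return corners + e01 + e12 + list(reversed(e20)) + interior
-- ===== Notes on version B (the rewrite author's own statement) =====
-- stated objective: alternative
-- what changed: Replaces A's four separate generation loops (one per edge, plus a nested interior loop) by a single nested scan of the whole grid p+q+r=N that classifies every node by its zero coordinates into interior/corner/edge buckets (interior first as the common case) and concatenates the buckets, reversing the third (q-vanishing) edge bucket once to restore A's s-order.
import Mathlib
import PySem

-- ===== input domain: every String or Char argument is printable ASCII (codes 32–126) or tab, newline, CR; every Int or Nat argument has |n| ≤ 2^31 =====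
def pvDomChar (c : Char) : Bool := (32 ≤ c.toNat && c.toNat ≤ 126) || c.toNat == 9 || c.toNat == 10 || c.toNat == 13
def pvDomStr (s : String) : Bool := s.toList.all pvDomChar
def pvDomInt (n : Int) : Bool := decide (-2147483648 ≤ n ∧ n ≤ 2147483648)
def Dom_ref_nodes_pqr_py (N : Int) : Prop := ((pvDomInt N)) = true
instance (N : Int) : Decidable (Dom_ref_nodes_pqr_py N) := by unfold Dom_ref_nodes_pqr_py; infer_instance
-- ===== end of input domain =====

-- B replaces A's four separate generation loops by one classification scan of the full grid
-- p+q+r=N (bucketed by zero-coordinate count, third edge bucket reversed once): an alternative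
-- decomposition of the same O(N^2) enumeration, proved to return the identical list.


-- ===== PORT A =====
def ref_nodes_pqr_py (N : Int) : List (Int × Int × Int) :=
  let nodes : List (Int × Int × Int) := [] ++ [(N, 0, 0), (0, N, 0), (0, 0, N)]
  let nodes := (PySem.List.pyRange 1 N 1).foldl (fun acc s => acc ++ [(N - s, s, 0)]) nodes
  let nodes := (PySem.List.pyRange 1 N 1).foldl (fun acc s => acc ++ [(0, N - s, s)]) nodes
  let nodes := (PySem.List.pyRange 1 N 1).foldl (fun acc s => acc ++ [(s, 0, N - s)]) nodes
  let nodes := (PySem.List.pyRange 1 N 1).foldl (fun acc r =>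
      (PySem.List.pyRange 1 (N - r) 1).foldl (fun acc2 q =>
        let p := N - q - r
        if p ≥ 1 then acc2 ++ [(p, q, r)] else acc2) acc) nodes
  nodes

-- ===== PORT B =====
def ref_nodes_pqr_py_alt (N : Int) : List (Int × Int × Int) :=
  let corners : List (Int × Int × Int) := [(N, 0, 0), (0, N, 0), (0, 0, N)]
  let st :=
    (PySem.List.pyRange 0 (N + 1) 1).foldl (fun st r =>
      (PySem.List.pyRange 0 (N - r + 1) 1).foldl (fun st q =>
        let p := N - q - r
        if ¬ p = 0 ∧ ¬ q = 0 ∧ ¬ r = 0 then (st.1, st.2.1, st.2.2.1, st.2.2.2 ++ [(p, q, r)])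
        else if ((if p = 0 then 1 else 0) + (if q = 0 then 1 else 0) + (if r = 0 then 1 else 0) : Int) ≥ 2 then st
        else if r = 0 then (st.1 ++ [(p, q, r)], st.2.1, st.2.2.1, st.2.2.2)
        else if p = 0 then (st.1, st.2.1 ++ [(p, q, r)], st.2.2.1, st.2.2.2)
        else (st.1, st.2.1, st.2.2.1 ++ [(p, q, r)], st.2.2.2)) st)
      (([], [], [], []) : List (Int × Int × Int) × List (Int × Int × Int) × List (Int × Int × Int) × List (Int × Int × Int))
  corners ++ st.1 ++ st.2.1 ++ st.2.2.1.reverse ++ st.2.2.2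

-- ===== PRECONDITION & SPEC =====
def Spec_ref_nodes_pqr_py (N : Int) (out : List (Int × Int × Int)) : Prop := out = ref_nodes_pqr_py_alt N
instance (N : Int) (out : List (Int × Int × Int)) : Decidable (Spec_ref_nodes_pqr_py N out) := by unfold Spec_ref_nodes_pqr_py; infer_instance

-- ===== CLAIM (what is proved, stated in full; the proofs are below) =====
def Claim_equal_ref_nodes_pqr_py : Prop := ∀ (N : Int), Dom_ref_nodes_pqr_py N → Spec_ref_nodes_pqr_py N (ref_nodes_pqr_py N)

-- ===== LEMMAS AND PROOFS =====

-- proof-only helpers: the classification scan of B, recast as filters of the full grid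
abbrev PvSt := List (Int × Int × Int) × List (Int × Int × Int) × List (Int × Int × Int) × List (Int × Int × Int)

def pvZ (x : Int × Int × Int) : Int :=
  (if x.1 = 0 then 1 else 0) + (if x.2.1 = 0 then 1 else 0) + (if x.2.2 = 0 then 1 else 0)

def pvDispatch (st : PvSt) (x : Int × Int × Int) : PvSt :=
  if ¬ x.1 = 0 ∧ ¬ x.2.1 = 0 ∧ ¬ x.2.2 = 0 then (st.1, st.2.1, st.2.2.1, st.2.2.2 ++ [x])
  else if pvZ x ≥ 2 then st
  else if x.2.2 = 0 then (st.1 ++ [x], st.2.1, st.2.2.1, st.2.2.2)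
  else if x.1 = 0 then (st.1, st.2.1 ++ [x], st.2.2.1, st.2.2.2)
  else (st.1, st.2.1, st.2.2.1 ++ [x], st.2.2.2)

def pvC1 (x : Int × Int × Int) : Bool := decide (pvZ x = 1 ∧ x.2.2 = 0)
def pvC2 (x : Int × Int × Int) : Bool := decide (pvZ x = 1 ∧ ¬ x.2.2 = 0 ∧ x.1 = 0)
def pvC3 (x : Int × Int × Int) : Bool := decide (pvZ x = 1 ∧ ¬ x.2.2 = 0 ∧ ¬ x.1 = 0)
def pvC4 (x : Int × Int × Int) : Bool := decide (¬ pvZ x ≥ 2 ∧ ¬ pvZ x = 1)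

def pvUpd (c : Int × Int × Int → Bool) (l : List (Int × Int × Int)) (x : Int × Int × Int) :
    List (Int × Int × Int) := if c x then l ++ [x] else l

def pvRow (N r : Int) : List (Int × Int × Int) :=
  (PySem.List.pyRange 0 (N - r + 1) 1).map (fun q => (N - q - r, q, r))

def pvPts (N : Int) : List (Int × Int × Int) :=
  (PySem.List.pyRange 0 (N + 1) 1).flatMap (pvRow N)

def pvFold (N : Int) : PvSt :=
  (PySem.List.pyRange 0 (N + 1) 1).foldl (fun st r =>
    (PySem.List.pyRange 0 (N - r + 1) 1).foldl
      (fun st q => pvDispatch st (N - q - r, q, r)) st)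
    (([], [], [], []) : PvSt)

theorem pvDispatch_eq (st : PvSt) (x : Int × Int × Int) :
    pvDispatch st x = (pvUpd pvC1 st.1 x, pvUpd pvC2 st.2.1 x, pvUpd pvC3 st.2.2.1 x, pvUpd pvC4 st.2.2.2 x) := by
  obtain ⟨p, q, r⟩ := x
  by_cases hp : p = 0 <;> by_cases hq : q = 0 <;> by_cases hr : r = 0 <;>
    simp [pvDispatch, pvUpd, pvC1, pvC2, pvC3, pvC4, pvZ, hp, hq, hr]

theorem pvFoldl_filters (l : List (Int × Int × Int)) :
    l.foldl pvDispatch (([], [], [], []) : PvSt)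
      = (l.filter pvC1, l.filter pvC2, l.filter pvC3, l.filter pvC4) := by
  have hd : pvDispatch = fun (st : PvSt) x =>
      (pvUpd pvC1 st.1 x, pvUpd pvC2 st.2.1 x, pvUpd pvC3 st.2.2.1 x, pvUpd pvC4 st.2.2.2 x) :=
    funext fun st => funext fun x => pvDispatch_eq st x
  have hu : ∀ (c : Int × Int × Int → Bool) (l : List (Int × Int × Int)),
      l.foldl (pvUpd c) [] = l.filter c := by
    intro c l
    rw [show pvUpd c = fun acc x => if c x then acc ++ [x] else acc from rfl,
      PySem.List.foldl_append_if_eq_filter]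
    simp
  rw [hd]
  rw [PySem.List.foldl_prod_mk (f := pvUpd pvC1)
    (g := fun (s : List (Int × Int × Int) × List (Int × Int × Int) × List (Int × Int × Int)) e =>
      (pvUpd pvC2 s.1 e, pvUpd pvC3 s.2.1 e, pvUpd pvC4 s.2.2 e))]
  rw [PySem.List.foldl_prod_mk (f := pvUpd pvC2)
    (g := fun (s : List (Int × Int × Int) × List (Int × Int × Int)) e =>
      (pvUpd pvC3 s.1 e, pvUpd pvC4 s.2 e))]
  rw [PySem.List.foldl_prod_mk (f := pvUpd pvC3) (g := pvUpd pvC4)]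
  rw [hu, hu, hu, hu]

theorem pvFold_eq_filters (N : Int) :
    pvFold N = ((pvPts N).filter pvC1, (pvPts N).filter pvC2, (pvPts N).filter pvC3, (pvPts N).filter pvC4) := by
  have hin : (fun (st : PvSt) r => (PySem.List.pyRange 0 (N - r + 1) 1).foldl
        (fun st q => pvDispatch st (N - q - r, q, r)) st)
      = fun (st : PvSt) r => (pvRow N r).foldl pvDispatch st := by
    funext st r
    rw [pvRow, List.foldl_map]
  rw [pvFold, hin, ← List.foldl_flatMap]
  exact pvFoldl_filters _

theorem alt_char (N : Int) : ref_nodes_pqr_py_alt N =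
    [(N, 0, 0), (0, N, 0), (0, 0, N)] ++ (pvPts N).filter pvC1 ++ (pvPts N).filter pvC2
      ++ ((pvPts N).filter pvC3).reverse ++ (pvPts N).filter pvC4 := by
  have h0 : ref_nodes_pqr_py_alt N =
      [(N, 0, 0), (0, N, 0), (0, 0, N)] ++ (pvFold N).1 ++ (pvFold N).2.1
        ++ (pvFold N).2.2.1.reverse ++ (pvFold N).2.2.2 := rfl
  rw [h0, pvFold_eq_filters]

theorem a_char (N : Int) : ref_nodes_pqr_py N =
    [(N, 0, 0), (0, N, 0), (0, 0, N)]
      ++ (PySem.List.pyRange 1 N 1).map (fun s => (N - s, s, 0))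
      ++ (PySem.List.pyRange 1 N 1).map (fun s => (0, N - s, s))
      ++ (PySem.List.pyRange 1 N 1).map (fun s => (s, 0, N - s))
      ++ (PySem.List.pyRange 1 N 1).flatMap
          (fun r => (PySem.List.pyRange 1 (N - r) 1).map (fun q => (N - q - r, q, r))) := by
  simp only [ref_nodes_pqr_py]
  simp only [PySem.List.foldl_append_singleton_eq_map, PySem.List.foldl_append_ite,
    PySem.List.foldl_append_eq_flatMap]
  have hfe : ∀ r : Int, (PySem.List.pyRange 1 (N - r) 1).filter (fun q => decide (N - q - r ≥ 1))
      = PySem.List.pyRange 1 (N - r) 1 := by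
    intro r
    apply List.filter_eq_self.mpr
    intro q hq
    rw [PySem.List.mem_pyRange_one] at hq
    simp only [decide_eq_true_eq]
    omega
  simp [hfe]

theorem pts_split (N : Int) (hN : 1 ≤ N) :
    pvPts N = pvRow N 0 ++ ((PySem.List.pyRange 1 N 1).flatMap (pvRow N) ++ pvRow N N) := by
  rw [pvPts, PySem.List.pyRange_one_cons (show (0:Int) < N + 1 by omega),
    show (0:Int) + 1 = 1 by norm_num,
    PySem.List.pyRange_one_succ_right hN]
  simp

theorem row0_split (N : Int) (hN : 1 ≤ N) :
    pvRow N 0 = (N, 0, 0) :: ((PySem.List.pyRange 1 N 1).map (fun s => (N - s, s, 0)) ++ [(0, N, 0)]) := by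
  rw [pvRow, show N - 0 + 1 = N + 1 by ring,
    PySem.List.pyRange_one_cons (show (0:Int) < N + 1 by omega),
    show (0:Int) + 1 = 1 by norm_num,
    PySem.List.pyRange_one_succ_right hN]
  simp only [List.map_cons, List.map_append, List.map_cons, List.map_nil]
  refine congrArg₂ _ (by norm_num) (congrArg₂ _ (List.map_congr_left ?_) (by norm_num [Prod.ext_iff]))
  intro s _
  norm_num

theorem rowN_eq (N : Int) : pvRow N N = [(0, 0, N)] := by
  rw [pvRow, show N - N + 1 = (0:Int) + 1 by ring, PySem.List.pyRange_one_singleton]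
  norm_num

theorem row_mid_split (N r : Int) (_h1 : 1 ≤ r) (h2 : r ≤ N - 1) :
    pvRow N r = (N - r, 0, r) ::
      ((PySem.List.pyRange 1 (N - r) 1).map (fun q => (N - q - r, q, r)) ++ [(0, N - r, r)]) := by
  rw [pvRow,
    PySem.List.pyRange_one_cons (show (0:Int) < N - r + 1 by omega),
    show (0:Int) + 1 = 1 by norm_num,
    PySem.List.pyRange_one_succ_right (show (1:Int) ≤ N - r by omega)]
  simp only [List.map_cons, List.map_append, List.map_nil]
  refine congrArg₂ _ (by norm_num) (congrArg₂ _ rfl (by norm_num [Prod.ext_iff]))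

theorem pts_filter_split (N : Int) (hN : 1 ≤ N) (c : Int × Int × Int → Bool)
    (h1 : c (N, 0, 0) = false) (h2 : c (0, N, 0) = false) (h3 : c (0, 0, N) = false) :
    (pvPts N).filter c
      = ((PySem.List.pyRange 1 N 1).map (fun s => ((N - s, s, 0) : Int × Int × Int))).filter c
        ++ (PySem.List.pyRange 1 N 1).flatMap (fun r =>
            (((N - r, 0, r) : Int × Int × Int) ::
              ((PySem.List.pyRange 1 (N - r) 1).map (fun q => ((N - q - r, q, r) : Int × Int × Int))
                ++ [((0, N - r, r) : Int × Int × Int)])).filter c) := by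
  rw [pts_split N hN, List.filter_append, List.filter_append, row0_split N hN, rowN_eq,
    List.filter_flatMap]
  rw [List.flatMap_congr (g := fun r =>
      ((((N - r, 0, r) : Int × Int × Int) ::
        ((PySem.List.pyRange 1 (N - r) 1).map (fun q => ((N - q - r, q, r) : Int × Int × Int))
          ++ [((0, N - r, r) : Int × Int × Int)])).filter c)) ?_]
  · simp [List.filter_cons, h1, h2, h3]
  · intro r hr
    rw [PySem.List.mem_pyRange_one] at hr
    rw [row_mid_split N r hr.1 (by omega)]

theorem filter_c1_pts (N : Int) (hN : 1 ≤ N) :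
    (pvPts N).filter pvC1 = (PySem.List.pyRange 1 N 1).map (fun s => (N - s, s, 0)) := by
  rw [pts_filter_split N hN pvC1
    (by simp only [pvC1, pvZ, decide_eq_false_iff_not]; split_ifs <;> omega)
    (by simp only [pvC1, pvZ, decide_eq_false_iff_not]; split_ifs <;> omega)
    (by simp only [pvC1, pvZ, decide_eq_false_iff_not]; split_ifs <;> omega)]
  have hm : ((PySem.List.pyRange 1 N 1).map (fun s => ((N - s, s, 0) : Int × Int × Int))).filter pvC1
      = (PySem.List.pyRange 1 N 1).map (fun s => ((N - s, s, 0) : Int × Int × Int)) := by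
    apply List.filter_eq_self.mpr
    intro x hx
    obtain ⟨s, hs, rfl⟩ := List.mem_map.mp hx
    rw [PySem.List.mem_pyRange_one] at hs
    simp only [pvC1, pvZ, decide_eq_true_eq]
    split_ifs <;> first | omega | simp_all
  have hf : ∀ r ∈ PySem.List.pyRange 1 N 1,
      ((((N - r, 0, r) : Int × Int × Int) ::
        ((PySem.List.pyRange 1 (N - r) 1).map (fun q => ((N - q - r, q, r) : Int × Int × Int))
          ++ [((0, N - r, r) : Int × Int × Int)])).filter pvC1) = ([] : List (Int × Int × Int)) := by
    intro r hr
    rw [PySem.List.mem_pyRange_one] at hr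
    simp only [List.filter_cons, List.filter_append]
    have e1 : pvC1 ((N - r, 0, r) : Int × Int × Int) = false := by
      simp only [pvC1, pvZ, decide_eq_false_iff_not]; split_ifs <;> omega
    have e2 : pvC1 ((0, N - r, r) : Int × Int × Int) = false := by
      simp only [pvC1, pvZ, decide_eq_false_iff_not]; split_ifs <;> omega
    have e3 : ((PySem.List.pyRange 1 (N - r) 1).map
        (fun q => ((N - q - r, q, r) : Int × Int × Int))).filter pvC1 = [] := by
      apply List.filter_eq_nil_iff.mpr
      intro x hx
      obtain ⟨q, hq, rfl⟩ := List.mem_map.mp hx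
      rw [PySem.List.mem_pyRange_one] at hq
      simp only [pvC1, pvZ, decide_eq_true_eq]
      split_ifs <;> omega
    simp [e1, e2, e3]
  rw [List.flatMap_congr hf]
  simp [hm]

theorem filter_c2_pts (N : Int) (hN : 1 ≤ N) :
    (pvPts N).filter pvC2 = (PySem.List.pyRange 1 N 1).map (fun s => (0, N - s, s)) := by
  rw [pts_filter_split N hN pvC2
    (by simp only [pvC2, pvZ, decide_eq_false_iff_not]; split_ifs <;> omega)
    (by simp only [pvC2, pvZ, decide_eq_false_iff_not]; split_ifs <;> omega)
    (by simp only [pvC2, pvZ, decide_eq_false_iff_not]; split_ifs <;> omega)]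
  have hm : ((PySem.List.pyRange 1 N 1).map (fun s => ((N - s, s, 0) : Int × Int × Int))).filter pvC2
      = [] := by
    apply List.filter_eq_nil_iff.mpr
    intro x hx
    obtain ⟨s, hs, rfl⟩ := List.mem_map.mp hx
    rw [PySem.List.mem_pyRange_one] at hs
    simp only [pvC2, pvZ, decide_eq_true_eq]
    split_ifs <;> omega
  have hf : ∀ r ∈ PySem.List.pyRange 1 N 1,
      ((((N - r, 0, r) : Int × Int × Int) ::
        ((PySem.List.pyRange 1 (N - r) 1).map (fun q => ((N - q - r, q, r) : Int × Int × Int))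
          ++ [((0, N - r, r) : Int × Int × Int)])).filter pvC2)
        = [((0, N - r, r) : Int × Int × Int)] := by
    intro r hr
    rw [PySem.List.mem_pyRange_one] at hr
    simp only [List.filter_cons, List.filter_append]
    have e1 : pvC2 ((N - r, 0, r) : Int × Int × Int) = false := by
      simp only [pvC2, pvZ, decide_eq_false_iff_not]; split_ifs <;> omega
    have e2 : pvC2 ((0, N - r, r) : Int × Int × Int) = true := by
      simp only [pvC2, pvZ, decide_eq_true_eq]; split_ifs <;> first | omega | simp_all
    have e3 : ((PySem.List.pyRange 1 (N - r) 1).map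
        (fun q => ((N - q - r, q, r) : Int × Int × Int))).filter pvC2 = [] := by
      apply List.filter_eq_nil_iff.mpr
      intro x hx
      obtain ⟨q, hq, rfl⟩ := List.mem_map.mp hx
      rw [PySem.List.mem_pyRange_one] at hq
      simp only [pvC2, pvZ, decide_eq_true_eq]
      split_ifs <;> omega
    simp [e1, e2, e3]
  rw [List.flatMap_congr hf, ← List.map_eq_flatMap]
  simp [hm]

theorem filter_c3_pts (N : Int) (hN : 1 ≤ N) :
    (pvPts N).filter pvC3 = (PySem.List.pyRange 1 N 1).map (fun r => (N - r, 0, r)) := by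
  rw [pts_filter_split N hN pvC3
    (by simp only [pvC3, pvZ, decide_eq_false_iff_not]; split_ifs <;> omega)
    (by simp only [pvC3, pvZ, decide_eq_false_iff_not]; split_ifs <;> omega)
    (by simp only [pvC3, pvZ, decide_eq_false_iff_not]; split_ifs <;> omega)]
  have hm : ((PySem.List.pyRange 1 N 1).map (fun s => ((N - s, s, 0) : Int × Int × Int))).filter pvC3
      = [] := by
    apply List.filter_eq_nil_iff.mpr
    intro x hx
    obtain ⟨s, hs, rfl⟩ := List.mem_map.mp hx
    rw [PySem.List.mem_pyRange_one] at hs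
    simp only [pvC3, pvZ, decide_eq_true_eq]
    split_ifs <;> first | omega | simp_all
  have hf : ∀ r ∈ PySem.List.pyRange 1 N 1,
      ((((N - r, 0, r) : Int × Int × Int) ::
        ((PySem.List.pyRange 1 (N - r) 1).map (fun q => ((N - q - r, q, r) : Int × Int × Int))
          ++ [((0, N - r, r) : Int × Int × Int)])).filter pvC3)
        = [((N - r, 0, r) : Int × Int × Int)] := by
    intro r hr
    rw [PySem.List.mem_pyRange_one] at hr
    simp only [List.filter_cons, List.filter_append]
    have e1 : pvC3 ((N - r, 0, r) : Int × Int × Int) = true := by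
      simp only [pvC3, pvZ, decide_eq_true_eq]; split_ifs <;> omega
    have e2 : pvC3 ((0, N - r, r) : Int × Int × Int) = false := by
      simp only [pvC3, pvZ, decide_eq_false_iff_not]; split_ifs <;> first | omega | simp_all
    have e3 : ((PySem.List.pyRange 1 (N - r) 1).map
        (fun q => ((N - q - r, q, r) : Int × Int × Int))).filter pvC3 = [] := by
      apply List.filter_eq_nil_iff.mpr
      intro x hx
      obtain ⟨q, hq, rfl⟩ := List.mem_map.mp hx
      rw [PySem.List.mem_pyRange_one] at hq
      simp only [pvC3, pvZ, decide_eq_true_eq]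
      split_ifs <;> omega
    simp [e1, e2, e3]
  rw [List.flatMap_congr hf, ← List.map_eq_flatMap]
  simp [hm]

theorem filter_c4_pts (N : Int) (hN : 1 ≤ N) :
    (pvPts N).filter pvC4 = (PySem.List.pyRange 1 N 1).flatMap
      (fun r => (PySem.List.pyRange 1 (N - r) 1).map (fun q => (N - q - r, q, r))) := by
  rw [pts_filter_split N hN pvC4
    (by simp only [pvC4, pvZ, decide_eq_false_iff_not]; split_ifs <;> omega)
    (by simp only [pvC4, pvZ, decide_eq_false_iff_not]; split_ifs <;> omega)
    (by simp only [pvC4, pvZ, decide_eq_false_iff_not]; split_ifs <;> omega)]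
  have hm : ((PySem.List.pyRange 1 N 1).map (fun s => ((N - s, s, 0) : Int × Int × Int))).filter pvC4
      = [] := by
    apply List.filter_eq_nil_iff.mpr
    intro x hx
    obtain ⟨s, hs, rfl⟩ := List.mem_map.mp hx
    rw [PySem.List.mem_pyRange_one] at hs
    simp only [pvC4, pvZ, decide_eq_true_eq]
    split_ifs <;> omega
  have hf : ∀ r ∈ PySem.List.pyRange 1 N 1,
      ((((N - r, 0, r) : Int × Int × Int) ::
        ((PySem.List.pyRange 1 (N - r) 1).map (fun q => ((N - q - r, q, r) : Int × Int × Int))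
          ++ [((0, N - r, r) : Int × Int × Int)])).filter pvC4)
        = (PySem.List.pyRange 1 (N - r) 1).map (fun q => ((N - q - r, q, r) : Int × Int × Int)) := by
    intro r hr
    rw [PySem.List.mem_pyRange_one] at hr
    simp only [List.filter_cons, List.filter_append]
    have e1 : pvC4 ((N - r, 0, r) : Int × Int × Int) = false := by
      simp only [pvC4, pvZ, decide_eq_false_iff_not]; split_ifs <;> omega
    have e2 : pvC4 ((0, N - r, r) : Int × Int × Int) = false := by
      simp only [pvC4, pvZ, decide_eq_false_iff_not]; split_ifs <;> omega
    have e3 : ((PySem.List.pyRange 1 (N - r) 1).map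
        (fun q => ((N - q - r, q, r) : Int × Int × Int))).filter pvC4
        = (PySem.List.pyRange 1 (N - r) 1).map (fun q => ((N - q - r, q, r) : Int × Int × Int)) := by
      apply List.filter_eq_self.mpr
      intro x hx
      obtain ⟨q, hq, rfl⟩ := List.mem_map.mp hx
      rw [PySem.List.mem_pyRange_one] at hq
      simp only [pvC4, pvZ, decide_eq_true_eq]
      split_ifs <;> omega
    simp [e1, e2, e3]
  rw [List.flatMap_congr hf]
  simp [hm]

theorem rev20 (N : Int) :
    ((PySem.List.pyRange 1 N 1).map (fun r => ((N - r, 0, r) : Int × Int × Int))).reverse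
      = (PySem.List.pyRange 1 N 1).map (fun s => ((s, 0, N - s) : Int × Int × Int)) := by
  apply List.ext_getElem
  · simp [PySem.List.length_pyRange_one]
  · intro i h1 h2
    simp only [List.length_reverse, List.length_map, PySem.List.length_pyRange_one] at h1 h2
    simp only [List.getElem_reverse, List.getElem_map, List.length_map,
      PySem.List.length_pyRange_one, PySem.List.getElem_pyRange_one, Prod.ext_iff, true_and]
    omega

theorem ref_nodes_main (N : Int) : ref_nodes_pqr_py N = ref_nodes_pqr_py_alt N := by
  by_cases hN : 1 ≤ N
  · rw [a_char, alt_char, filter_c1_pts N hN, filter_c2_pts N hN, filter_c3_pts N hN,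
      filter_c4_pts N hN]
    simp only [rev20 N]
  · by_cases h0 : N = 0
    · subst h0; rfl
    · have e1 : PySem.List.pyRange 1 N 1 = [] := PySem.List.pyRange_one_eq_nil (by omega)
      have e2 : PySem.List.pyRange 0 (N + 1) 1 = [] := PySem.List.pyRange_one_eq_nil (by omega)
      simp [ref_nodes_pqr_py, ref_nodes_pqr_py_alt, e1, e2]

-- ===== VERDICT (by name: the statement is the Claim_ definition above) =====
theorem ref_nodes_pqr_py_spec : Claim_equal_ref_nodes_pqr_py := by
  intro N _
  exact ref_nodes_main N
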